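-- pv_equiv track=rewrite | github.com/lutharsanen/DeepLearning2048 | Python/Sarsa/create_states.py | get_all_states_light
-- ===== SOURCE A (Python) =====
-- def get_all_states_light(length,base):
--     states = []
--     for i0 in range(length):
--         for i1 in range(length):
--             for i2 in range(length):
--                 for i3 in range(length):
--                    states.append([base**i0 if i0 !=0 else 0,base**i1 if i1 !=0 else 0,base**i2 if i2!=0 else 0, base **i3 if i3!=0 else 0])
--     return states
-- ===== SOURCE B (Python) =====
-- def get_all_states_light(length, base):
--     vals = [base**i if i else 0 for i in range(length)]
--
--     def tuples(k):
--         if k == 0: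
--             return [[]]
--         rest = tuples(k - 1)
--         return [[v] + t for v in vals for t in rest]
--
--     return tuples(4)
-- ===== Notes on version B (the rewrite author's own statement) =====
-- stated objective: simpler
-- what changed: B precomputes the cell-value table once and builds the result as the recursive 4-fold Cartesian power of that table (comprehension/flatMap), instead of four nested loops appending rows while recomputing base**i with an inline conditional at every cell.
import Mathlib
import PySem

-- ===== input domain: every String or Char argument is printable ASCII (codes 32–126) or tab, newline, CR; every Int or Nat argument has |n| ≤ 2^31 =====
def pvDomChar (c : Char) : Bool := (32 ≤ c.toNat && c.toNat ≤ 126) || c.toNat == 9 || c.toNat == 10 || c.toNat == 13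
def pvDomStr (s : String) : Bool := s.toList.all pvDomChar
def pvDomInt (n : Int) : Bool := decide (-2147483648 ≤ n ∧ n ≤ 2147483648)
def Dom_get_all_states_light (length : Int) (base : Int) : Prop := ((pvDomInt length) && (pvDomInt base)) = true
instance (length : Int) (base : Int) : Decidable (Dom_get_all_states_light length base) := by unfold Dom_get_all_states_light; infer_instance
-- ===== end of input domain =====

-- B replaces A's four nested append-accumulator loops by a precomputed value table and a
-- recursive Cartesian power (tuples of length 4) built by comprehension; objective: simpler.

-- ===== PORT A =====
-- literal port of A: four nested for-loops over range(length), appending one row at a time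
def get_all_states_light (length : Int) (base : Int) : List (List Int) :=
  (PySem.List.pyRange 0 length 1).foldl (fun states i0 =>
    (PySem.List.pyRange 0 length 1).foldl (fun states i1 =>
      (PySem.List.pyRange 0 length 1).foldl (fun states i2 =>
        (PySem.List.pyRange 0 length 1).foldl (fun states i3 =>
          states ++ [[if i0 ≠ 0 then base ^ i0.toNat else 0,
                      if i1 ≠ 0 then base ^ i1.toNat else 0,
                      if i2 ≠ 0 then base ^ i2.toNat else 0,
                      if i3 ≠ 0 then base ^ i3.toNat else 0]]) states) states) states) []

-- ===== PORT B =====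
-- vals = [base**i if i else 0 for i in range(length)]
def pvVals (length : Int) (base : Int) : List Int :=
  (PySem.List.pyRange 0 length 1).map (fun i => if i ≠ 0 then base ^ i.toNat else 0)

-- tuples(k): recursive Cartesian power of vals
def pvTuples (vals : List Int) : Nat → List (List Int)
  | 0 => [[]]
  | k + 1 => vals.flatMap (fun v => (pvTuples vals k).map (fun t => v :: t))

def get_all_states_light_alt (length : Int) (base : Int) : List (List Int) :=
  pvTuples (pvVals length base) 4

-- ===== PRECONDITION & SPEC =====
def Spec_get_all_states_light (length : Int) (base : Int) (out : List (List Int)) : Prop := out = get_all_states_light_alt length base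
instance (length : Int) (base : Int) (out : List (List Int)) : Decidable (Spec_get_all_states_light length base out) := by unfold Spec_get_all_states_light; infer_instance

-- ===== CLAIM (what is proved, stated in full; the proofs are below) =====
def Claim_equal_get_all_states_light : Prop := ∀ (length : Int) (base : Int), Dom_get_all_states_light length base → Spec_get_all_states_light length base (get_all_states_light length base)

-- ===== LEMMAS AND PROOFS =====
theorem pv_flatMap_single {α β : Type} (l : List α) (g : α → List β) :
    l.flatMap (fun x => [g x]) = l.map g := by
  induction l with
  | nil => rfl
  | cons h t ih => simp [List.flatMap_cons, ih]

-- ===== VERDICT (by name: the statement is the Claim_ definition above) =====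
theorem get_all_states_light_spec : Claim_equal_get_all_states_light := by
  intro length base _
  unfold Spec_get_all_states_light get_all_states_light get_all_states_light_alt pvVals
  simp only [PySem.List.foldl_append_singleton_eq_map, PySem.List.foldl_append_eq_flatMap,
    pvTuples, List.nil_append, List.map_flatMap, List.map_map, List.flatMap_map]
  simp only [Function.comp_def, List.map_cons, List.map_nil]
  simp only [pv_flatMap_single]
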